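-- pv_equiv track=rewrite | github.com/wusimo/reskip | src/starvla_integration.py | _compute_block_endpoints
-- ===== SOURCE A (Python) =====
-- def _compute_block_endpoints(num_layers: int, n_blocks: int) -> list[int]:
--     base = num_layers // n_blocks
--     remainder = num_layers % n_blocks
--     endpoints = []
--     layer_idx = 0
--     for block_idx in range(n_blocks):
--         layer_idx += base + (1 if block_idx < remainder else 0)
--         endpoints.append(layer_idx)
--     return endpoints
-- ===== SOURCE B (Python) =====
-- def _compute_block_endpoints(num_layers: int, n_blocks: int) -> list[int]:
--     base = num_layers // n_blocks
--     remainder = num_layers % n_blocks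
--     return [(i + 1) * base + min(i + 1, remainder) for i in range(n_blocks)]
-- ===== Notes on version B (the rewrite author's own statement) =====
-- stated objective: simpler
-- what changed: Replaces the sequential running-accumulator loop by a closed-form per-index endpoint (i+1)*base + min(i+1, remainder), so each element is computed independently.
import Mathlib
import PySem

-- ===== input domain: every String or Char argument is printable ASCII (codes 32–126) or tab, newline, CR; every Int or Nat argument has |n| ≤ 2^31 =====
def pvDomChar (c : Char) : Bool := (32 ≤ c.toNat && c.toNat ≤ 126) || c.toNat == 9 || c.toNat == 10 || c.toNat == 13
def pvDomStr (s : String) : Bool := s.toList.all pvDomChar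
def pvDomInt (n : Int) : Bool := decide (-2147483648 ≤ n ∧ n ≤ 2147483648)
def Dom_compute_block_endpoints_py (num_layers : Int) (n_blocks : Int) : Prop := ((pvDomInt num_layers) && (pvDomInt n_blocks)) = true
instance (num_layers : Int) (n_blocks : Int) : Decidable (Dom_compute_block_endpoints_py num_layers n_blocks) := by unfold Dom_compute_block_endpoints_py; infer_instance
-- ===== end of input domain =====

-- B replaces A's running layer_idx accumulator by a closed-form per-index endpoint
-- (i+1)*base + min(i+1, remainder); objective: simpler.


-- ===== PORT A =====
def compute_block_endpoints_py (num_layers : Int) (n_blocks : Int) : List Int :=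
  let base := PySem.Int.floordiv num_layers n_blocks
  let remainder := PySem.Int.mod num_layers n_blocks
  let st := (PySem.List.pyRange 0 n_blocks 1).foldl
    (fun (st : List Int × Int) block_idx =>
      let layer_idx := st.2 + (base + (if block_idx < remainder then 1 else 0))
      (st.1 ++ [layer_idx], layer_idx))
    (([] : List Int), (0 : Int))
  st.1

-- ===== PORT B =====
def compute_block_endpoints_py_alt (num_layers : Int) (n_blocks : Int) : List Int :=
  let base := PySem.Int.floordiv num_layers n_blocks
  let remainder := PySem.Int.mod num_layers n_blocks
  (PySem.List.pyRange 0 n_blocks 1).map (fun i => (i + 1) * base + min (i + 1) remainder)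

-- ===== PRECONDITION & SPEC =====
-- Pre_ excludes exactly n_blocks = 0, where Python A raises ZeroDivisionError.
def Pre_compute_block_endpoints_py (num_layers : Int) (n_blocks : Int) : Prop := n_blocks ≠ 0
instance (num_layers : Int) (n_blocks : Int) : Decidable (Pre_compute_block_endpoints_py num_layers n_blocks) := by unfold Pre_compute_block_endpoints_py; infer_instance
def pvWitness_compute_block_endpoints_py : Int × Int := (10, 3)

def Spec_compute_block_endpoints_py (num_layers : Int) (n_blocks : Int) (out : List Int) : Prop := out = compute_block_endpoints_py_alt num_layers n_blocks
instance (num_layers : Int) (n_blocks : Int) (out : List Int) : Decidable (Spec_compute_block_endpoints_py num_layers n_blocks out) := by unfold Spec_compute_block_endpoints_py; infer_instance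

-- ===== CLAIM (what is proved, stated in full; the proofs are below) =====
def Claim_equal_compute_block_endpoints_py : Prop := ∀ (num_layers : Int) (n_blocks : Int), Dom_compute_block_endpoints_py num_layers n_blocks → Pre_compute_block_endpoints_py num_layers n_blocks → Spec_compute_block_endpoints_py num_layers n_blocks (compute_block_endpoints_py num_layers n_blocks)

-- ===== LEMMAS AND PROOFS =====

-- Loop invariant: after folding over range(0, m), A's accumulator pair is
-- (the list of closed-form endpoints, m*base + min(m, remainder)).
theorem pv_loop_eq (base rem : Int) (hrem : 0 ≤ rem) (m : Nat) :
    (PySem.List.pyRange 0 (m : Int) 1).foldl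
      (fun (st : List Int × Int) block_idx =>
        let layer_idx := st.2 + (base + (if block_idx < rem then 1 else 0))
        (st.1 ++ [layer_idx], layer_idx))
      (([] : List Int), (0 : Int))
    = ((PySem.List.pyRange 0 (m : Int) 1).map (fun i => (i + 1) * base + min (i + 1) rem),
       (m : Int) * base + min (m : Int) rem) := by
  induction m with
  | zero => simp [PySem.List.pyRange_one_eq_nil (by omega : (0:Int) ≤ 0), hrem]
  | succ k ih =>
      have hsplit : PySem.List.pyRange 0 ((k + 1 : Nat) : Int) 1
          = PySem.List.pyRange 0 (k : Int) 1 ++ [(k : Int)] := by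
        have := PySem.List.pyRange_one_succ_right (a := 0) (b := (k : Int)) (by positivity)
        push_cast
        exact this
      rw [hsplit, List.foldl_append, ih, List.map_append]
      have hmin : min ((k : Int) + 1) rem
          = min (k : Int) rem + (if (k : Int) < rem then 1 else 0) := by
        split_ifs with h <;> omega
      simp only [List.foldl_cons, List.foldl_nil, List.map_cons, List.map_nil,
        Prod.mk.injEq, List.append_cancel_left_eq, List.cons.injEq, and_true]
      push_cast
      constructor <;> (rw [hmin]; ring)

-- ===== VERDICT (by name: the statement is the Claim_ definition above) =====
theorem compute_block_endpoints_py_spec : Claim_equal_compute_block_endpoints_py := by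
  intro num_layers n_blocks _ hpre
  unfold Spec_compute_block_endpoints_py compute_block_endpoints_py compute_block_endpoints_py_alt
  by_cases hpos : 0 < n_blocks
  · have hrem : 0 ≤ PySem.Int.mod num_layers n_blocks := PySem.Int.mod_nonneg _ hpos
    have hcast : n_blocks = ((n_blocks.toNat : Nat) : Int) := by omega
    rw [hcast] at hrem ⊢
    dsimp only
    rw [pv_loop_eq _ _ hrem]
  · have : n_blocks ≤ 0 := by omega
    rw [PySem.List.pyRange_one_eq_nil this]
    simp
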